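-- pv_equiv track=rewrite | github.com/MissEveryThingData/python-tasks | task9.py | task9
-- ===== SOURCE A (Python) =====
-- def task9(input_string):
--
--     vowels = 'aeiou'
--
--     extracted_vowels = []
--
--     for char in input_string:
--
--         if char.lower() in vowels:
--             extracted_vowels.append(char.lower())
--
--     sorted_vowels = sorted(extracted_vowels)
--
--     return sorted_vowels
-- ===== SOURCE B (Python) =====
-- def task9(input_string):
--     out = []
--     for lo, up in (('a', 'A'), ('e', 'E'), ('i', 'I'), ('o', 'O'), ('u', 'U')):
--         out += [lo] * (input_string.count(lo) + input_string.count(up))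
--     return out
-- ===== Notes on version B (the rewrite author's own statement) =====
-- stated objective: faster
-- what changed: Replaces collect-then-sort with a counting sort over the five vowels: count each vowel in both cases with str.count and emit the counts in a,e,i,o,u order, removing the sort and the per-character Python loop.
import Mathlib
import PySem

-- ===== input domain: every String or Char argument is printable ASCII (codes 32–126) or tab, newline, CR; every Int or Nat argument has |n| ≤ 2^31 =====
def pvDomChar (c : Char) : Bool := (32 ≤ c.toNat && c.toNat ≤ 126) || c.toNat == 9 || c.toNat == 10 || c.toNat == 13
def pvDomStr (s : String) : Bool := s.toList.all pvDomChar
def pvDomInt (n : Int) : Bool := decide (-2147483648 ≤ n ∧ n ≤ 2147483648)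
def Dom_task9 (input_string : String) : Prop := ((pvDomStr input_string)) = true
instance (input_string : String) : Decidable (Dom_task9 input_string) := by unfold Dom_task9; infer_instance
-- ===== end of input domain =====

-- B replaces A's collect-then-sort with a counting sort over the five vowels: count each vowel in both cases with str.count and emit the counts in a,e,i,o,u order.


-- ===== PORT A =====
def task9 (input_string : String) : List String :=
  let vowels := "aeiou"
  let extracted_vowels : List String := input_string.toList.foldl
    (fun acc c =>
      if PySem.Str.isIn (String.ofList (PySem.Chars.lower [c])) vowels
      then acc ++ [String.ofList (PySem.Chars.lower [c])] else acc) []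
  PySem.List.sorted extracted_vowels (fun x => x) false

-- ===== PORT B =====
def task9_alt (input_string : String) : List String :=
  [("a", "A"), ("e", "E"), ("i", "I"), ("o", "O"), ("u", "U")].foldl
    (fun out p =>
      out ++ List.replicate (PySem.Str.count input_string p.1 + PySem.Str.count input_string p.2) p.1)
    []

-- ===== PRECONDITION & SPEC =====
def Spec_task9 (input_string : String) (out : List String) : Prop := out = task9_alt input_string
instance (input_string : String) (out : List String) : Decidable (Spec_task9 input_string out) := by unfold Spec_task9; infer_instance

-- ===== CLAIM (what is proved, stated in full; the proofs are below) =====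
def Claim_equal_task9 : Prop := ∀ (input_string : String), Dom_task9 input_string → Spec_task9 input_string (task9 input_string)

-- ===== LEMMAS AND PROOFS =====

theorem char_inj (d e : Char) (h : d.toNat = e.toNat) : d = e := by
  rw [← Char.ofNat_toNat d, ← Char.ofNat_toNat e, h]

-- lowering a char yields a given lowercase letter v iff the char is v or its uppercase twin u
theorem lowerChar_eq_iff (c v u : Char) (h97 : 97 ≤ v.toNat) (h122 : v.toNat ≤ 122)
    (huv : u.toNat + 32 = v.toNat) :
    PySem.Chars.lowerChar c = v ↔ (c = v ∨ c = u) := by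
  have hA : ∀ d : Char, ('A' ≤ d) ↔ (65 ≤ d.toNat) := fun d => ge_iff_le
  have hZ : ∀ d : Char, (d ≤ 'Z') ↔ (d.toNat ≤ 90) := fun d => Iff.rfl
  have hvalid : ∀ n : Nat, n ≤ 1000 → n.isValidChar := fun n hn => Or.inl (by omega)
  unfold PySem.Chars.lowerChar PySem.Chars.isupper
  constructor
  · intro h
    split at h
    · next hu =>
        simp only [Bool.and_eq_true, decide_eq_true_eq, hA, hZ] at hu
        have := congrArg Char.toNat h
        rw [Char.toNat_ofNat, if_pos (hvalid _ (by omega))] at this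
        right; exact char_inj _ _ (by omega)
    · left; exact h
  · rintro (rfl | rfl)
    · rw [if_neg]
      simp only [Bool.and_eq_true, decide_eq_true_eq, hA, hZ]
      omega
    · rw [if_pos]
      · apply char_inj
        rw [Char.toNat_ofNat, if_pos (hvalid _ (by omega))]
        omega
      · simp only [Bool.and_eq_true, decide_eq_true_eq, hA, hZ]
        omega

theorem ofList_singleton_eq_iff (d e : Char) : (String.ofList [d] = String.ofList [e]) ↔ d = e := by
  constructor
  · intro h; have := congrArg String.toList h; simpa using this
  · rintro rfl; rfl

-- A's membership test: the lowered one-char string is a substring of "aeiou" iff the lowered char is a vowel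
theorem lowered_mem_iff (c : Char) :
    (PySem.Str.isIn (String.ofList (PySem.Chars.lower [c])) "aeiou" = true)
      ↔ PySem.Chars.lowerChar c ∈ ['a','e','i','o','u'] := by
  rw [PySem.Str.isIn_iff_infix]
  simp [PySem.Chars.lower]
  rw [List.singleton_infix_iff]
  simp

-- count of one vowel string in A's extracted list = B's counter predicate
theorem count_vowel (l : List Char) (v u : Char) (sv : String)
    (hv : v ∈ ['a','e','i','o','u']) (huv : u.toNat + 32 = v.toNat)
    (hsv : sv = String.ofList [v]) :
    List.count sv
      ((l.filter (fun c => PySem.Str.isIn (String.ofList (PySem.Chars.lower [c])) "aeiou")).map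
        (fun c => String.ofList (PySem.Chars.lower [c])))
      = l.countP (fun c => c = v ∨ c = u) := by
  subst hsv
  have h97 : 97 ≤ v.toNat ∧ v.toNat ≤ 122 := by fin_cases hv <;> exact ⟨by decide, by decide⟩
  rw [List.count_eq_countP, List.countP_map, List.countP_filter]
  apply List.countP_congr
  intro c _
  simp only [Function.comp, PySem.Chars.lower, List.map, beq_iff_eq, Bool.and_eq_true,
    decide_eq_true_eq]
  constructor
  · rintro ⟨h1, _⟩
    have : PySem.Chars.lowerChar c = v := ((ofList_singleton_eq_iff _ _).mp h1.symm).symm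
    exact (lowerChar_eq_iff c v u h97.1 h97.2 huv).mp this
  · intro h
    have hl : PySem.Chars.lowerChar c = v := (lowerChar_eq_iff c v u h97.1 h97.2 huv).mpr h
    refine ⟨by rw [hl], ?_⟩
    rw [hl]
    fin_cases hv <;> decide

-- a string that is not one of the five vowel strings never occurs in A's extracted list
theorem count_other (l : List Char) (x : String) (hx : ¬ x ∈ (["a","e","i","o","u"] : List String)) :
    List.count x
      ((l.filter (fun c => PySem.Str.isIn (String.ofList (PySem.Chars.lower [c])) "aeiou")).map
        (fun c => String.ofList (PySem.Chars.lower [c]))) = 0 := by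
  rw [List.count_eq_zero]
  intro hmem
  rcases List.mem_map.mp hmem with ⟨c, hc, hgc⟩
  rcases List.mem_filter.mp hc with ⟨-, hq⟩
  have hmem5 := (lowered_mem_iff c).mp hq
  apply hx
  rw [← hgc]
  simp only [PySem.Chars.lower, List.map]
  simp only [List.mem_cons, List.not_mem_nil, or_false] at hmem5
  simp only [List.mem_cons, List.not_mem_nil, or_false]
  rcases hmem5 with h|h|h|h|h <;> rw [h] <;> decide

-- B's output is sorted (pairwise ≤)
theorem pairwise_out (a e i o u : Nat) :
    List.Pairwise (fun x1 x2 => x1 ≤ x2)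
      (List.replicate a "a" ++ List.replicate e "e" ++ List.replicate i "i"
        ++ List.replicate o "o" ++ List.replicate u "u") := by
  have hfl : List.replicate a "a" ++ List.replicate e "e" ++ List.replicate i "i"
        ++ List.replicate o "o" ++ List.replicate u "u"
      = List.flatten [List.replicate a "a", List.replicate e "e", List.replicate i "i",
          List.replicate o "o", List.replicate u "u"] := by simp
  rw [hfl, List.pairwise_flatten]
  refine ⟨?_, ?_⟩
  · intro l hl
    simp only [List.mem_cons, List.not_mem_nil, or_false] at hl
    rcases hl with rfl|rfl|rfl|rfl|rfl <;> simp [List.pairwise_replicate]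
  · have hb : ∀ (n m : Nat) (s t : String), s ≤ t →
        ∀ x ∈ List.replicate n s, ∀ y ∈ List.replicate m t, x ≤ y := by
      intro n m s t hst x hx y hy
      rw [List.eq_of_mem_replicate hx, List.eq_of_mem_replicate hy]
      exact hst
    refine List.Pairwise.cons ?_ (List.Pairwise.cons ?_ (List.Pairwise.cons ?_
      (List.Pairwise.cons ?_ (List.pairwise_singleton _ _)))) <;>
      · intro l hl
        simp only [List.mem_cons, List.not_mem_nil, or_false] at hl
        rcases hl with rfl|rfl|rfl|rfl|rfl <;>
          exact hb _ _ _ _ (le_of_lt (by rw [String.lt_iff_toList_lt]; decide))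

-- Python's s.count(ch) for a single character is the number of occurrences of that character
theorem count_go_singleton (d : Char) (l : List Char) (acc fuel : Nat) (h : l.length ≤ fuel) :
    PySem.Chars.count.go [d] fuel l acc = acc + List.count d l := by
  induction l generalizing fuel acc with
  | nil => cases fuel <;> simp [PySem.Chars.count.go]
  | cons c t ih =>
      cases fuel with
      | zero => simp at h
      | succ n =>
          simp only [PySem.Chars.count.go, List.isPrefixOf, List.count_cons]
          by_cases hc : d = c
          · subst hc
            simp only [BEq.rfl, Bool.true_and]
            rw [if_pos]
            · show PySem.Chars.count.go [d] n t (acc + 1) = _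
              rw [ih _ _ (by simpa using h)]
              simp only [if_pos trivial]
              omega
            · simp
          · rw [if_neg (by simp [hc])]
            show PySem.Chars.count.go [d] n t acc = _
            rw [ih _ _ (by simpa using h)]
            simp [Ne.symm hc, hc]

theorem count_singleton (l : List Char) (d : Char) :
    PySem.Chars.count l [d] = List.count d l := by
  rw [show PySem.Chars.count l [d] = PySem.Chars.count.go [d] l.length l 0 from rfl,
    count_go_singleton d l 0 l.length le_rfl]
  simp

-- counting either case of a vowel in one pass = the sum of the two character counts
theorem countP_or_eq (l : List Char) (d e : Char) (h : d ≠ e) :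
    l.countP (fun c => c = d ∨ c = e) = l.count d + l.count e := by
  induction l with
  | nil => rfl
  | cons c t ih =>
      simp only [List.countP_cons, List.count_cons, ih]
      by_cases h1 : c = d <;> by_cases h2 : c = e <;> simp_all <;> omega

-- B's output written with the per-case counts
theorem alt_eq (s : String) :
    task9_alt s =
      List.replicate (s.toList.countP (fun c => c = 'a' ∨ c = 'A')) "a"
        ++ List.replicate (s.toList.countP (fun c => c = 'e' ∨ c = 'E')) "e"
        ++ List.replicate (s.toList.countP (fun c => c = 'i' ∨ c = 'I')) "i"
        ++ List.replicate (s.toList.countP (fun c => c = 'o' ∨ c = 'O')) "o"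
        ++ List.replicate (s.toList.countP (fun c => c = 'u' ∨ c = 'U')) "u" := by
  unfold task9_alt
  simp only [List.foldl_cons, List.foldl_nil, List.nil_append, PySem.Str.count_eq]
  rw [show ("a" : String).toList = ['a'] from rfl, show ("A" : String).toList = ['A'] from rfl,
    show ("e" : String).toList = ['e'] from rfl, show ("E" : String).toList = ['E'] from rfl,
    show ("i" : String).toList = ['i'] from rfl, show ("I" : String).toList = ['I'] from rfl,
    show ("o" : String).toList = ['o'] from rfl, show ("O" : String).toList = ['O'] from rfl,
    show ("u" : String).toList = ['u'] from rfl, show ("U" : String).toList = ['U'] from rfl]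
  simp only [count_singleton]
  rw [countP_or_eq s.toList 'a' 'A' (by decide), countP_or_eq s.toList 'e' 'E' (by decide),
    countP_or_eq s.toList 'i' 'I' (by decide), countP_or_eq s.toList 'o' 'O' (by decide),
    countP_or_eq s.toList 'u' 'U' (by decide)]

theorem count_rep_ne (n : Nat) (s t : String) (h : ¬ t = s) :
    List.count s (List.replicate n t) = 0 := by
  simp [List.count_replicate, h]

-- B's output is a permutation of A's extracted list
theorem perm_out (l : List Char) :
    (List.replicate (l.countP (fun c => c = 'a' ∨ c = 'A')) "a"
      ++ List.replicate (l.countP (fun c => c = 'e' ∨ c = 'E')) "e"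
      ++ List.replicate (l.countP (fun c => c = 'i' ∨ c = 'I')) "i"
      ++ List.replicate (l.countP (fun c => c = 'o' ∨ c = 'O')) "o"
      ++ List.replicate (l.countP (fun c => c = 'u' ∨ c = 'U')) "u").Perm
    ((l.filter (fun c => PySem.Str.isIn (String.ofList (PySem.Chars.lower [c])) "aeiou")).map
      (fun c => String.ofList (PySem.Chars.lower [c]))) := by
  rw [List.perm_iff_count]
  intro x
  simp only [List.count_append]
  by_cases hx : x ∈ (["a","e","i","o","u"] : List String)
  · simp only [List.mem_cons, List.not_mem_nil, or_false] at hx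
    rcases hx with rfl|rfl|rfl|rfl|rfl
    · rw [count_vowel l 'a' 'A' "a" (by decide) (by decide) (by decide),
        List.count_replicate_self, count_rep_ne _ "a" "e" (by decide), count_rep_ne _ "a" "i" (by decide), count_rep_ne _ "a" "o" (by decide), count_rep_ne _ "a" "u" (by decide)]
      omega
    · rw [count_vowel l 'e' 'E' "e" (by decide) (by decide) (by decide),
        List.count_replicate_self, count_rep_ne _ "e" "a" (by decide), count_rep_ne _ "e" "i" (by decide), count_rep_ne _ "e" "o" (by decide), count_rep_ne _ "e" "u" (by decide)]
      omega
    · rw [count_vowel l 'i' 'I' "i" (by decide) (by decide) (by decide),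
        List.count_replicate_self, count_rep_ne _ "i" "a" (by decide), count_rep_ne _ "i" "e" (by decide), count_rep_ne _ "i" "o" (by decide), count_rep_ne _ "i" "u" (by decide)]
      omega
    · rw [count_vowel l 'o' 'O' "o" (by decide) (by decide) (by decide),
        List.count_replicate_self, count_rep_ne _ "o" "a" (by decide), count_rep_ne _ "o" "e" (by decide), count_rep_ne _ "o" "i" (by decide), count_rep_ne _ "o" "u" (by decide)]
      omega
    · rw [count_vowel l 'u' 'U' "u" (by decide) (by decide) (by decide),
        List.count_replicate_self, count_rep_ne _ "u" "a" (by decide), count_rep_ne _ "u" "e" (by decide), count_rep_ne _ "u" "i" (by decide), count_rep_ne _ "u" "o" (by decide)]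
      omega
  · rw [count_other l x hx]
    simp only [List.mem_cons, List.not_mem_nil, or_false] at hx
    push Not at hx
    simp [List.count_replicate, Ne.symm hx.1, Ne.symm hx.2.1, Ne.symm hx.2.2.1,
      Ne.symm hx.2.2.2.1, Ne.symm hx.2.2.2.2]

-- ===== VERDICT (by name: the statement is the Claim_ definition above) =====
theorem task9_spec : Claim_equal_task9 := by
  intro s _
  unfold Spec_task9 task9
  rw [alt_eq]
  simp only [PySem.List.foldl_append_if, List.nil_append]
  exact PySem.List.sorted_id_eq_of_perm_of_pairwise _ _ (perm_out s.toList)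
    (pairwise_out _ _ _ _ _)
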